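-- pv_equiv track=rewrite | github.com/jason-allen-oneal/plaguefire | app/map_utils/fov.py | update_visibility
-- ===== SOURCE A (Python) =====
-- from typing import List
--
-- MapData = List[List[str]]
--
-- VisibilityData = List[List[int]]
--
-- def update_visibility(
--     current_visibility: VisibilityData,
--     player_pos: List[int],
--     game_map: MapData, # Use this for bounds
--     radius: int
-- ) -> VisibilityData:
--     """
--     Calculates FOV (simple square) and updates visibility map.
--     Returns the *new* visibility grid.
--     """
--     px, py = player_pos
--     map_height = len(game_map)
--     map_width = len(game_map[0]) if map_height > 0 else 0
--     # Create new visibility based on actual map size, copying old state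
--     new_visibility = [[current_visibility[y][x] if y < len(current_visibility) and x < len(current_visibility[y]) else 0
--                        for x in range(map_width)] for y in range(map_height)]
--
--     # Mark previously visible as remembered
--     for y in range(map_height):
--         for x in range(map_width):
--             if new_visibility[y][x] == 2:
--                 new_visibility[y][x] = 1
--
--     # Simple square FOV
--     for y_offset in range(-radius, radius + 1):
--         for x_offset in range(-radius, radius + 1):
--             check_x, check_y = px + x_offset, py + y_offset
--             # --- Use actual map dimensions for bounds check ---
--             if 0 <= check_y < map_height and 0 <= check_x < map_width:
--                  # --- TODO: Add line-of-sight check here using game_map ---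
--                  # if line_of_sight(game_map, px, py, check_x, check_y):
--                      new_visibility[check_y][check_x] = 2 # Mark as currently visible
--
--     return new_visibility
-- ===== SOURCE B (Python) =====
-- def update_visibility(current_visibility, player_pos, game_map, radius):
--     """Single whole-grid pass: each cell's final value is computed directly
--     (2 inside the FOV square, else the old value with 2 demoted to 1)."""
--     px, py = player_pos
--     map_height = len(game_map)
--     map_width = len(game_map[0]) if map_height > 0 else 0
--
--     def cell(y, x):
--         if abs(x - px) <= radius and abs(y - py) <= radius:
--             return 2
--         old = current_visibility[y][x] if y < len(current_visibility) and x < len(current_visibility[y]) else 0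
--         return 1 if old == 2 else old
--
--     return [[cell(y, x) for x in range(map_width)] for y in range(map_height)]
-- ===== Notes on version B (the rewrite author's own statement) =====
-- stated objective: simpler
-- what changed: Replaces A's three phases (copy the old grid, demote every 2 to 1, then iterate the (2r+1)^2 FOV offsets writing 2s in place) by one whole-grid comprehension that computes each cell's final value directly from a per-cell distance test.
import Mathlib
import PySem

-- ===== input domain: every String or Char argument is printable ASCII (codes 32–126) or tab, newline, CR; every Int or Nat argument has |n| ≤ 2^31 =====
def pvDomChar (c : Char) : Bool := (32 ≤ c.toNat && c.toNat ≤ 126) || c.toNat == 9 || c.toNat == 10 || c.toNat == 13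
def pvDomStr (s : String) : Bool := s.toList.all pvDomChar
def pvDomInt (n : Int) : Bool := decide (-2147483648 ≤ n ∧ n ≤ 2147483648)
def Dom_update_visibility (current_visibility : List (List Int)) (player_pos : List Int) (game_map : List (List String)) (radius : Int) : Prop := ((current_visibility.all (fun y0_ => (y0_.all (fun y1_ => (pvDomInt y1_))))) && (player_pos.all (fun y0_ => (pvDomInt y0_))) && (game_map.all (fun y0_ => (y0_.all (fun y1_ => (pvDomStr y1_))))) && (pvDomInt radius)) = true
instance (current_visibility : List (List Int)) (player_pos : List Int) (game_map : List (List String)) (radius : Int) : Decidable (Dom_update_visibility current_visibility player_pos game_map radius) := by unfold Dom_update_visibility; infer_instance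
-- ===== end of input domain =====

-- B folds A's copy pass, demote pass and FOV-square write pass into one whole-grid
-- comprehension computing each cell directly (objective: simpler; same return value).

-- ===== PORT A =====

-- the guarded old-cell read 'current_visibility[y][x] if y < len(..) and x < len(..) else 0'
-- (this exact expression appears in both Pythons)
def pvOld (cv : List (List Int)) (y x : Nat) : Int :=
  if y < cv.length then
    if x < (cv.getD y []).length then (cv.getD y []).getD x 0 else 0
  else 0

-- 'new_visibility[y][x] = v' for in-range nonnegative indices (exact: indices here are
-- always guarded to be ≥ 0 and in range, where Python list assignment is plain set)
def pvSet2d (g : List (List Int)) (y x : Nat) (v : Int) : List (List Int) :=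
  g.set y ((g.getD y []).set x v)

def update_visibility (current_visibility : List (List Int)) (player_pos : List Int) (game_map : List (List String)) (radius : Int) : List (List Int) :=
  match player_pos with
  | [px, py] =>
    let map_height := game_map.length
    let map_width := if map_height > 0 then (game_map.getD 0 []).length else 0
    -- copy pass
    let base := (List.range map_height).map (fun y => (List.range map_width).map (fun x => pvOld current_visibility y x))
    -- demote pass: 2 → 1
    let demoted := (List.range map_height).foldl (fun g y =>
        (List.range map_width).foldl (fun g x =>
          if (g.getD y []).getD x 0 = 2 then pvSet2d g y x 1 else g) g) base
    -- FOV square pass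
    (PySem.List.pyRange (-radius) (radius + 1) 1).foldl (fun g y_offset =>
        (PySem.List.pyRange (-radius) (radius + 1) 1).foldl (fun g x_offset =>
          let check_x := px + x_offset
          let check_y := py + y_offset
          if 0 ≤ check_y ∧ check_y < (map_height : Int) ∧ 0 ≤ check_x ∧ check_x < (map_width : Int) then
            pvSet2d g check_y.toNat check_x.toNat 2
          else g) g) demoted
  | _ => []  -- Python raises on unpack; excluded by Pre_

-- ===== PORT B =====
-- B's per-cell value: FOV distance test first, else the demoted old value
def pvCell (cv : List (List Int)) (px py radius : Int) (y x : Nat) : Int :=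
  if |(x : Int) - px| ≤ radius ∧ |(y : Int) - py| ≤ radius then 2
  else
    let old :=
      if y < cv.length then
        if x < (cv.getD y []).length then (cv.getD y []).getD x 0 else 0
      else 0
    if old = 2 then 1 else old

def update_visibility_alt (current_visibility : List (List Int)) (player_pos : List Int) (game_map : List (List String)) (radius : Int) : List (List Int) :=
  if player_pos.length = 2 then
    let px := player_pos.getD 0 0
    let py := player_pos.getD 1 0
    let map_height := game_map.length
    let map_width := if map_height > 0 then (game_map.getD 0 []).length else 0
    (List.range map_height).map (fun (y : Nat) =>
      (List.range map_width).map (fun (x : Nat) => pvCell current_visibility px py radius y x))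
  else []  -- Python raises on unpack; excluded by Pre_

-- ===== PRECONDITION & SPEC =====
-- A raises ValueError unpacking player_pos unless it has exactly two elements.
def Pre_update_visibility (current_visibility : List (List Int)) (player_pos : List Int) (game_map : List (List String)) (radius : Int) : Prop :=
  player_pos.length = 2
instance (current_visibility : List (List Int)) (player_pos : List Int) (game_map : List (List String)) (radius : Int) : Decidable (Pre_update_visibility current_visibility player_pos game_map radius) := by unfold Pre_update_visibility; infer_instance

def pvWitness_update_visibility : List (List Int) × List Int × List (List String) × Int :=
  ([[0, 2], [1, 0]], [0, 0], [[".", "#"], [".", "."]], 1)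

def Spec_update_visibility (current_visibility : List (List Int)) (player_pos : List Int) (game_map : List (List String)) (radius : Int) (out : List (List Int)) : Prop := out = update_visibility_alt current_visibility player_pos game_map radius
instance (current_visibility : List (List Int)) (player_pos : List Int) (game_map : List (List String)) (radius : Int) (out : List (List Int)) : Decidable (Spec_update_visibility current_visibility player_pos game_map radius out) := by unfold Spec_update_visibility; infer_instance

-- ===== CLAIM (what is proved, stated in full; the proofs are below) =====
def Claim_equal_update_visibility : Prop := ∀ (current_visibility : List (List Int)) (player_pos : List Int) (game_map : List (List String)) (radius : Int), Dom_update_visibility current_visibility player_pos game_map radius → Pre_update_visibility current_visibility player_pos game_map radius → Spec_update_visibility current_visibility player_pos game_map radius (update_visibility current_visibility player_pos game_map radius)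

-- ===== LEMMAS AND PROOFS =====

-- the rectangular grid of a pointwise function
def pvGridF (H W : Nat) (f : Nat → Nat → Int) : List (List Int) :=
  (List.range H).map (fun y => (List.range W).map (fun x => f y x))

theorem pvGridF_congr {H W : Nat} {f g : Nat → Nat → Int}
    (h : ∀ y < H, ∀ x < W, f y x = g y x) : pvGridF H W f = pvGridF H W g := by
  unfold pvGridF
  refine List.map_congr_left ?_
  intro y hy
  exact List.map_congr_left (fun x hx => h y (List.mem_range.mp hy) x (List.mem_range.mp hx))

theorem pvGridF_getD {H W : Nat} (f : Nat → Nat → Int) {y : Nat} (hy : y < H) :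
    (pvGridF H W f).getD y [] = (List.range W).map (fun x => f y x) := by
  unfold pvGridF
  rw [List.getD_eq_getElem?_getD, List.getElem?_map, List.getElem?_range hy]
  rfl

theorem pvGridF_read {H W : Nat} (f : Nat → Nat → Int) {y x : Nat} (hy : y < H) (hx : x < W) :
    ((pvGridF H W f).getD y []).getD x 0 = f y x := by
  rw [pvGridF_getD f hy, List.getD_eq_getElem?_getD, List.getElem?_map, List.getElem?_range hx]
  rfl

theorem pvSet_range_map {α : Type} {n i : Nat} (f : Nat → α) (v : α) (_hi : i < n) :
    ((List.range n).map f).set i v = (List.range n).map (fun j => if j = i then v else f j) := by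
  apply List.ext_getElem
  · simp
  · intro k h1 h2
    simp only [List.getElem_set, List.getElem_map, List.getElem_range]
    by_cases h : i = k <;> simp [h, eq_comm]

theorem pvSet2d_gridF {H W : Nat} (f : Nat → Nat → Int) {y x : Nat} (v : Int)
    (hy : y < H) (hx : x < W) :
    pvSet2d (pvGridF H W f) y x v
      = pvGridF H W (fun y' x' => if y' = y ∧ x' = x then v else f y' x') := by
  unfold pvSet2d
  rw [pvGridF_getD f hy, pvSet_range_map _ v hx]
  show (pvGridF H W f).set y _ = _
  unfold pvGridF
  rw [pvSet_range_map (fun y => (List.range W).map (fun x => f y x)) _ hy]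
  refine List.map_congr_left ?_
  intro y' _
  by_cases h : y' = y
  · subst h; simp
  · simp [h]

-- demote pass, inner loop
theorem pvDemote_inner {H W : Nat} (y : Nat) (hy : y < H) (xs : List Nat)
    (hxs : ∀ x ∈ xs, x < W) (f : Nat → Nat → Int) :
    xs.foldl (fun g x => if (g.getD y []).getD x 0 = 2 then pvSet2d g y x 1 else g) (pvGridF H W f)
      = pvGridF H W (fun y' x' => if y' = y ∧ x' ∈ xs ∧ f y' x' = 2 then 1 else f y' x') := by
  induction xs generalizing f with
  | nil => simp
  | cons x0 xs ih =>
    have hx0 : x0 < W := hxs x0 (by simp)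
    have hxs' : ∀ x ∈ xs, x < W := fun x hx => hxs x (by simp [hx])
    simp only [List.foldl_cons]
    rw [pvGridF_read f hy hx0]
    by_cases h2 : f y x0 = 2
    · rw [if_pos h2, pvSet2d_gridF f 1 hy hx0, ih hxs']
      apply pvGridF_congr
      intro y' _ x' _
      by_cases hyy : y' = y
      · subst hyy
        by_cases hxx : x' = x0
        · subst hxx; simp [h2]
        · simp [hxx]
      · simp [hyy]
    · rw [if_neg h2, ih hxs']
      apply pvGridF_congr
      intro y' _ x' _
      by_cases hyy : y' = y
      · subst hyy
        by_cases hxx : x' = x0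
        · subst hxx; simp [h2]
        · simp [hxx]
      · simp [hyy]

-- demote pass, outer loop
theorem pvDemote_outer {H W : Nat} (ys : List Nat) (hys : ∀ y ∈ ys, y < H) (f : Nat → Nat → Int) :
    ys.foldl (fun g y => (List.range W).foldl
        (fun g x => if (g.getD y []).getD x 0 = 2 then pvSet2d g y x 1 else g) g) (pvGridF H W f)
      = pvGridF H W (fun y' x' => if y' ∈ ys ∧ f y' x' = 2 then 1 else f y' x') := by
  induction ys generalizing f with
  | nil => simp
  | cons y0 ys ih =>
    have hy0 : y0 < H := hys y0 (by simp)
    have hys' : ∀ y ∈ ys, y < H := fun y hy => hys y (by simp [hy])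
    simp only [List.foldl_cons]
    rw [pvDemote_inner y0 hy0 (List.range W) (fun x hx => List.mem_range.mp hx) f, ih hys']
    apply pvGridF_congr
    intro y' hy' x' hx'
    by_cases hyy : y' = y0
    · subst hyy
      by_cases h2 : f y' x' = 2 <;> simp [h2, List.mem_range.mpr hx']
    · simp [hyy]

-- FOV pass, inner loop: all writes are the constant 2, so the result is pointwise
theorem pvFov_inner {H W : Nat} (px py yo : Int) (xs : List Int) (f : Nat → Nat → Int) :
    xs.foldl (fun g xo =>
        if 0 ≤ py + yo ∧ py + yo < (H : Int) ∧ 0 ≤ px + xo ∧ px + xo < (W : Int) then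
          pvSet2d g (py + yo).toNat (px + xo).toNat 2
        else g) (pvGridF H W f)
      = pvGridF H W (fun y x =>
          if (y : Int) = py + yo ∧ ∃ xo ∈ xs, (x : Int) = px + xo then 2 else f y x) := by
  induction xs generalizing f with
  | nil => simp
  | cons x0 xs ih =>
    simp only [List.foldl_cons]
    by_cases hb : 0 ≤ py + yo ∧ py + yo < (H : Int) ∧ 0 ≤ px + x0 ∧ px + x0 < (W : Int)
    · rw [if_pos hb]
      have hyH : (py + yo).toNat < H := by omega
      have hxW : (px + x0).toNat < W := by omega
      rw [pvSet2d_gridF f 2 hyH hxW, ih]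
      apply pvGridF_congr
      intro y hy x hx
      by_cases hc : (y : Int) = py + yo ∧ ∃ xo ∈ xs, (x : Int) = px + xo
      · obtain ⟨hc1, xo, hxo, hxe⟩ := hc
        rw [if_pos ⟨hc1, xo, hxo, hxe⟩, if_pos ⟨hc1, xo, List.mem_cons_of_mem _ hxo, hxe⟩]
      · rw [if_neg hc]
        by_cases hd : y = (py + yo).toNat ∧ x = (px + x0).toNat
        · rw [if_pos hd, if_pos ⟨by omega, x0, by simp, by omega⟩]
        · rw [if_neg hd, if_neg]
          rintro ⟨he1, xo, hxo, he2⟩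
          rcases List.mem_cons.mp hxo with h | h
          · subst h; exact hd ⟨by omega, by omega⟩
          · exact hc ⟨he1, xo, h, he2⟩
    · rw [if_neg hb, ih]
      apply pvGridF_congr
      intro y hy x hx
      apply if_congr _ rfl rfl
      constructor
      · rintro ⟨he1, xo, hxo, he2⟩
        exact ⟨he1, xo, by simp [hxo], he2⟩
      · rintro ⟨he1, xo, hxo, he2⟩
        rcases List.mem_cons.mp hxo with h | h
        · exfalso; subst h; exact hb ⟨by omega, by omega, by omega, by omega⟩
        · exact ⟨he1, xo, h, he2⟩

-- FOV pass, outer loop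
theorem pvFov_outer {H W : Nat} (px py : Int) (ys xsAll : List Int) (f : Nat → Nat → Int) :
    ys.foldl (fun g yo => xsAll.foldl (fun g xo =>
        if 0 ≤ py + yo ∧ py + yo < (H : Int) ∧ 0 ≤ px + xo ∧ px + xo < (W : Int) then
          pvSet2d g (py + yo).toNat (px + xo).toNat 2
        else g) g) (pvGridF H W f)
      = pvGridF H W (fun y x =>
          if (∃ yo ∈ ys, (y : Int) = py + yo) ∧ ∃ xo ∈ xsAll, (x : Int) = px + xo then 2
          else f y x) := by
  induction ys generalizing f with
  | nil => simp
  | cons y0 ys ih =>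
    simp only [List.foldl_cons]
    rw [pvFov_inner px py y0 xsAll f, ih]
    apply pvGridF_congr
    intro y hy x hx
    by_cases hc : (∃ yo ∈ ys, (y : Int) = py + yo) ∧ ∃ xo ∈ xsAll, (x : Int) = px + xo
    · rw [if_pos hc]
      obtain ⟨⟨yo, hyo, hye⟩, hex⟩ := hc
      rw [if_pos ⟨⟨yo, by simp [hyo], hye⟩, hex⟩]
    · rw [if_neg hc]
      by_cases hd : (y : Int) = py + y0 ∧ ∃ xo ∈ xsAll, (x : Int) = px + xo
      · rw [if_pos hd, if_pos ⟨⟨y0, by simp, hd.1⟩, hd.2⟩]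
      · rw [if_neg hd, if_neg]
        rintro ⟨⟨yo, hyo, hye⟩, hex⟩
        rcases List.mem_cons.mp hyo with h | h
        · subst h; exact hd ⟨hye, hex⟩
        · exact hc ⟨⟨yo, h, hye⟩, hex⟩

-- the whole pipeline of port A equals port B's comprehension, for arbitrary dimensions
theorem pvMain (cv : List (List Int)) (px py r : Int) (H W : Nat) :
    (PySem.List.pyRange (-r) (r + 1) 1).foldl (fun g y_offset =>
        (PySem.List.pyRange (-r) (r + 1) 1).foldl (fun g x_offset =>
          let check_x := px + x_offset
          let check_y := py + y_offset
          if 0 ≤ check_y ∧ check_y < (H : Int) ∧ 0 ≤ check_x ∧ check_x < (W : Int) then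
            pvSet2d g check_y.toNat check_x.toNat 2
          else g) g)
      ((List.range H).foldl (fun g y =>
        (List.range W).foldl (fun g x =>
          if (g.getD y []).getD x 0 = 2 then pvSet2d g y x 1 else g) g)
        ((List.range H).map (fun y => (List.range W).map (fun x => pvOld cv y x))))
      = (List.range H).map (fun (y : Nat) => (List.range W).map (fun (x : Nat) =>
          pvCell cv px py r y x)) := by
  have hbase : (List.range H).map (fun y => (List.range W).map (fun x => pvOld cv y x))
      = pvGridF H W (fun y x => pvOld cv y x) := rfl
  rw [hbase, pvDemote_outer (List.range H) (fun y hy => List.mem_range.mp hy) _]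
  have h2 := pvFov_outer (H := H) (W := W) px py (PySem.List.pyRange (-r) (r + 1) 1)
      (PySem.List.pyRange (-r) (r + 1) 1)
      (fun y' x' => if y' ∈ List.range H ∧ pvOld cv y' x' = 2 then 1 else pvOld cv y' x')
  simp only [] at h2 ⊢
  rw [h2]
  unfold pvGridF
  refine List.map_congr_left ?_
  intro y hy
  refine List.map_congr_left ?_
  intro x hx
  have hy' := List.mem_range.mp hy
  have hx' := List.mem_range.mp hx
  beta_reduce
  rw [show pvCell cv px py r y x = (if |(x : Int) - px| ≤ r ∧ |(y : Int) - py| ≤ r then 2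
        else if pvOld cv y x = 2 then 1 else pvOld cv y x) from rfl]
  by_cases hfov : |(x : Int) - px| ≤ r ∧ |(y : Int) - py| ≤ r
  · rw [if_pos hfov, if_pos]
    obtain ⟨h1, h2⟩ := hfov
    rw [abs_le] at h1 h2
    refine ⟨⟨(y : Int) - py, ?_, by ring⟩, (x : Int) - px, ?_, by ring⟩
    · rw [PySem.List.mem_pyRange_one]; omega
    · rw [PySem.List.mem_pyRange_one]; omega
  · rw [if_neg hfov, if_neg]
    · simp [List.mem_range.mpr hy']
    · rintro ⟨⟨yo, hyo, hye⟩, xo, hxo, hxe⟩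
      rw [PySem.List.mem_pyRange_one] at hyo hxo
      exact hfov ⟨abs_le.mpr ⟨by omega, by omega⟩, abs_le.mpr ⟨by omega, by omega⟩⟩

-- ===== VERDICT (by name: the statement is the Claim_ definition above) =====
theorem update_visibility_spec : Claim_equal_update_visibility := by
  intro cv pp gm r _hd hpre
  unfold Spec_update_visibility
  match pp, hpre with
  | [px, py], _ =>
    show update_visibility cv [px, py] gm r = update_visibility_alt cv [px, py] gm r
    unfold update_visibility_alt
    rw [if_pos (by simp)]
    exact pvMain cv px py r gm.length (if gm.length > 0 then (gm.getD 0 []).length else 0)
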